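-- pv_equiv track=rewrite | github.com/Logan-Summerlin/Pokemon-Battle-Autoresearch | src/data/auxiliary_labels.py | classify_move_families
-- ===== SOURCE A (Python) =====
-- _PIVOT_MOVES = {"batonpass"}
--
-- _HAZARD_MOVES = {"spikes"}
--
-- _RECOVERY_MOVES = {
--     "recover", "softboiled", "moonlight", "morningsun", "synthesis",
--     "slackoff", "milkdrink", "wish", "rest",
-- }
--
-- _SUPPORT_MOVES = {
--     "willowisp", "thunderwave", "toxic", "aromatherapy", "healbell",
--     "rapidspin", "haze", "whirlwind", "roar", "yawn",
--     "encore", "taunt", "trick", "knockoff", "reflect", "lightscreen",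
-- }
--
-- _SETUP_MOVES = {
--     "swordsdance", "calmmind", "dragondance", "bulkup",
--     "irondefense", "amnesia", "cosmicpower",
--     "curse", "agility", "bellydrum", "meditate",
-- }
--
-- def _normalize_move(name: str) -> str:
--     """Normalize move name for matching."""
--     return name.lower().replace(" ", "").replace("-", "").replace("_", "")
--
-- NUM_MOVE_FAMILIES = 10
--
-- _PRIORITY_MOVES = {
--     "extremespeed", "machpunch", "quickattack", "fakeout",
-- }
--
-- _HAZARD_REMOVAL_MOVES = {"rapidspin"}
--
-- _SCREEN_MOVES = {"reflect", "lightscreen"}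
--
-- _PHAZING_MOVES = {"whirlwind", "roar", "haze"}
--
-- _TRICK_MOVES = {"trick", "knockoff", "thief", "covet"}
--
-- def classify_move_families(moves: list[str]) -> list[int]:
--     """Classify which move families are present in a moveset.
--
--     Returns:
--         List of 10 binary values (0/1) indicating family presence.
--     """
--     families = [0] * NUM_MOVE_FAMILIES
--     if not moves:
--         return families
--
--     normalized = {_normalize_move(m) for m in moves if m}
--
--     if normalized & _PRIORITY_MOVES:
--         families[0] = 1
--     if normalized & _RECOVERY_MOVES:
--         families[1] = 1
--     if normalized & _HAZARD_MOVES: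
--         families[2] = 1
--     if normalized & _HAZARD_REMOVAL_MOVES:
--         families[3] = 1
--     if normalized & _SUPPORT_MOVES:
--         families[4] = 1
--     if normalized & _SETUP_MOVES:
--         families[5] = 1
--     if normalized & _PIVOT_MOVES:
--         families[6] = 1
--     if normalized & _SCREEN_MOVES:
--         families[7] = 1
--     if normalized & _PHAZING_MOVES:
--         families[8] = 1
--     if normalized & _TRICK_MOVES:
--         families[9] = 1
--
--     return families
-- ===== SOURCE B (Python) =====
-- # Inverted index: one precomputed map move -> family indices; single pass over moves.
-- _MOVE_TO_FAMILIES = {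
--     "extremespeed": [0], "machpunch": [0], "quickattack": [0], "fakeout": [0],
--     "recover": [1], "softboiled": [1], "moonlight": [1], "morningsun": [1],
--     "synthesis": [1], "slackoff": [1], "milkdrink": [1], "wish": [1], "rest": [1],
--     "spikes": [2],
--     "rapidspin": [3, 4],
--     "willowisp": [4], "thunderwave": [4], "toxic": [4], "aromatherapy": [4],
--     "healbell": [4], "yawn": [4], "encore": [4], "taunt": [4],
--     "haze": [4, 8], "whirlwind": [4, 8], "roar": [4, 8],
--     "trick": [4, 9], "knockoff": [4, 9],
--     "reflect": [4, 7], "lightscreen": [4, 7],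
--     "swordsdance": [5], "calmmind": [5], "dragondance": [5], "bulkup": [5],
--     "irondefense": [5], "amnesia": [5], "cosmicpower": [5],
--     "curse": [5], "agility": [5], "bellydrum": [5], "meditate": [5],
--     "batonpass": [6],
--     "thief": [9], "covet": [9],
-- }
--
-- def _normalize_move(name: str) -> str:
--     return name.lower().replace(" ", "").replace("-", "").replace("_", "")
--
-- def classify_move_families(moves: list[str]) -> list[int]:
--     families = [0] * 10
--     for m in moves:
--         if not m:
--             continue
--         for idx in _MOVE_TO_FAMILIES.get(_normalize_move(m), ()):
--             families[idx] = 1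
--     return families
-- ===== Notes on version B (the rewrite author's own statement) =====
-- stated objective: alternative
-- what changed: Replaces A's ten per-family set-intersection tests against a normalized-move set with a single precomputed inverted index (normalized move name -> list of family indices) consulted once per move in one pass that sets the indicated positions.
import Mathlib
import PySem

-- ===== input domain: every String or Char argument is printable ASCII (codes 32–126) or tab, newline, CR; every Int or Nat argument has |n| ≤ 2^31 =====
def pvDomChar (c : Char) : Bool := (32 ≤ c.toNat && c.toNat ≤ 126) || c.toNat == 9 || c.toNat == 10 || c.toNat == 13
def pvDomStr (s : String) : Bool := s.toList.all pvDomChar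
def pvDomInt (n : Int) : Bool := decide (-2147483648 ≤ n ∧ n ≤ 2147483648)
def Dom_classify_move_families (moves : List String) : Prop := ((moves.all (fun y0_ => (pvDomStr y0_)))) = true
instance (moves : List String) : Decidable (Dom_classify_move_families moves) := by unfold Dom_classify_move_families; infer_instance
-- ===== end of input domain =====

set_option maxRecDepth 8000
set_option maxHeartbeats 2000000


-- B replaces A's ten per-family set-intersection tests with one precomputed inverted index
-- (normalized move name -> family indices) consulted once per move in a single pass (objective: alternative).

-- ===== PORT A =====
def pvNormalize (name : String) : String :=
  PySem.Str.replace (PySem.Str.replace (PySem.Str.replace (PySem.Str.lower name) " " "") "-" "") "_" ""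

def pvPivotMoves : PySem.Set String := PySem.Set.ofList ["batonpass"]
def pvHazardMoves : PySem.Set String := PySem.Set.ofList ["spikes"]
def pvRecoveryMoves : PySem.Set String := PySem.Set.ofList
  ["recover", "softboiled", "moonlight", "morningsun", "synthesis",
   "slackoff", "milkdrink", "wish", "rest"]
def pvSupportMoves : PySem.Set String := PySem.Set.ofList
  ["willowisp", "thunderwave", "toxic", "aromatherapy", "healbell",
   "rapidspin", "haze", "whirlwind", "roar", "yawn",
   "encore", "taunt", "trick", "knockoff", "reflect", "lightscreen"]
def pvSetupMoves : PySem.Set String := PySem.Set.ofList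
  ["swordsdance", "calmmind", "dragondance", "bulkup",
   "irondefense", "amnesia", "cosmicpower",
   "curse", "agility", "bellydrum", "meditate"]
def pvPriorityMoves : PySem.Set String := PySem.Set.ofList
  ["extremespeed", "machpunch", "quickattack", "fakeout"]
def pvHazardRemovalMoves : PySem.Set String := PySem.Set.ofList ["rapidspin"]
def pvScreenMoves : PySem.Set String := PySem.Set.ofList ["reflect", "lightscreen"]
def pvPhazingMoves : PySem.Set String := PySem.Set.ofList ["whirlwind", "roar", "haze"]
def pvTrickMoves : PySem.Set String := PySem.Set.ofList ["trick", "knockoff", "thief", "covet"]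

-- the ten `if normalized & FAM: families[i] = 1` statements, in A's order
def pvClassifyNonempty (normalized : PySem.Set String) : List Int :=
  let families := List.replicate 10 (0 : Int)
  let families := if !(PySem.Set.inter normalized pvPriorityMoves).isEmpty then families.set 0 1 else families
  let families := if !(PySem.Set.inter normalized pvRecoveryMoves).isEmpty then families.set 1 1 else families
  let families := if !(PySem.Set.inter normalized pvHazardMoves).isEmpty then families.set 2 1 else families
  let families := if !(PySem.Set.inter normalized pvHazardRemovalMoves).isEmpty then families.set 3 1 else families
  let families := if !(PySem.Set.inter normalized pvSupportMoves).isEmpty then families.set 4 1 else families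
  let families := if !(PySem.Set.inter normalized pvSetupMoves).isEmpty then families.set 5 1 else families
  let families := if !(PySem.Set.inter normalized pvPivotMoves).isEmpty then families.set 6 1 else families
  let families := if !(PySem.Set.inter normalized pvScreenMoves).isEmpty then families.set 7 1 else families
  let families := if !(PySem.Set.inter normalized pvPhazingMoves).isEmpty then families.set 8 1 else families
  let families := if !(PySem.Set.inter normalized pvTrickMoves).isEmpty then families.set 9 1 else families
  families

def classify_move_families (moves : List String) : List Int :=
  if moves.isEmpty then List.replicate 10 (0 : Int)
  else pvClassifyNonempty (PySem.Set.ofList ((moves.filter (fun m => m != "")).map pvNormalize))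

-- ===== PORT B =====
def pvTableList : List (String × List Nat) :=
  [("extremespeed", [0]), ("machpunch", [0]), ("quickattack", [0]), ("fakeout", [0]),
   ("recover", [1]), ("softboiled", [1]), ("moonlight", [1]), ("morningsun", [1]),
   ("synthesis", [1]), ("slackoff", [1]), ("milkdrink", [1]), ("wish", [1]), ("rest", [1]),
   ("spikes", [2]),
   ("rapidspin", [3, 4]),
   ("willowisp", [4]), ("thunderwave", [4]), ("toxic", [4]), ("aromatherapy", [4]),
   ("healbell", [4]), ("yawn", [4]), ("encore", [4]), ("taunt", [4]),
   ("haze", [4, 8]), ("whirlwind", [4, 8]), ("roar", [4, 8]),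
   ("trick", [4, 9]), ("knockoff", [4, 9]),
   ("reflect", [4, 7]), ("lightscreen", [4, 7]),
   ("swordsdance", [5]), ("calmmind", [5]), ("dragondance", [5]), ("bulkup", [5]),
   ("irondefense", [5]), ("amnesia", [5]), ("cosmicpower", [5]),
   ("curse", [5]), ("agility", [5]), ("bellydrum", [5]), ("meditate", [5]),
   ("batonpass", [6]),
   ("thief", [9]), ("covet", [9])]

def pvMoveToFamilies : PySem.Dict String (List Nat) := PySem.Dict.mk pvTableList  -- dict literal with distinct keys

-- loop body: skip falsy moves, set every family index the inverted index lists for the move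
def pvStep (families : List Int) (m : String) : List Int :=
  if m == "" then families
  else (PySem.Dict.getD pvMoveToFamilies (pvNormalize m) []).foldl (fun fs idx => fs.set idx 1) families

def classify_move_families_alt (moves : List String) : List Int :=
  moves.foldl pvStep (List.replicate 10 (0 : Int))

-- ===== PRECONDITION & SPEC =====
def Spec_classify_move_families (moves : List String) (out : List Int) : Prop := out = classify_move_families_alt moves
instance (moves : List String) (out : List Int) : Decidable (Spec_classify_move_families moves out) := by unfold Spec_classify_move_families; infer_instance

-- ===== CLAIM (what is proved, stated in full; the proofs are below) =====
def Claim_equal_classify_move_families : Prop := ∀ (moves : List String), Dom_classify_move_families moves → Spec_classify_move_families moves (classify_move_families moves)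

-- ===== LEMMAS AND PROOFS =====

-- the ten family lists, in index order (closed terms, used only by the proofs)
def pvFams : List (List String) :=
  [pvPriorityMoves, pvRecoveryMoves, pvHazardMoves, pvHazardRemovalMoves, pvSupportMoves,
   pvSetupMoves, pvPivotMoves, pvScreenMoves, pvPhazingMoves, pvTrickMoves]

def pvHit (m : String) (j : Nat) : Bool :=
  (m != "") && ((PySem.Dict.getD pvMoveToFamilies (pvNormalize m) []).contains j)

def pvAct (moves : List String) (j : Nat) : Bool := moves.any (fun m => pvHit m j)

def pvC (moves : List String) (j : Nat) : Bool :=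
  !(PySem.Set.inter (PySem.Set.ofList ((moves.filter (fun m => m != "")).map pvNormalize)) (pvFams.getD j [])).isEmpty

lemma pvLookup_mem (L : List (String × List Nat)) (s : String) (j : Nat)
    (hnd : (L.map Prod.fst).Nodup) :
    (j ∈ ((PySem.Dict.mk L).get? s).getD []) ↔ ∃ p ∈ L, p.1 = s ∧ j ∈ p.2 := by
  induction L with
  | nil => simp [PySem.Dict.get?]
  | cons p L ih =>
    obtain ⟨k, v⟩ := p
    simp only [List.map_cons, List.nodup_cons] at hnd
    rw [PySem.Dict.get?_mk_cons]
    by_cases h : k = s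
    · subst h
      simp only [beq_self_eq_true, if_true, Option.getD_some]
      constructor
      · intro hv; exact ⟨(k, v), by simp, rfl, hv⟩
      · rintro ⟨q, hq, hq1, hq2⟩
        rcases List.mem_cons.mp hq with h' | h'
        · rw [h'] at hq2; exact hq2
        · exact absurd (hq1 ▸ List.mem_map_of_mem h') hnd.1
    · have hb : (k == s) = false := by simpa using h
      rw [hb]
      simp only [Bool.false_eq_true, if_false, ih hnd.2, List.mem_cons]
      constructor
      · rintro ⟨q, hq, hq1, hq2⟩; exact ⟨q, Or.inr hq, hq1, hq2⟩
      · rintro ⟨q, hq, hq1, hq2⟩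
        rcases hq with h' | h'
        · exact absurd (by rw [h'] at hq1; exact hq1) h
        · exact ⟨q, h', hq1, hq2⟩

-- the inverted index exactly mirrors per-family membership
lemma pvTable_ok' (s : String) (j : Nat) (hj : j < 10) :
    (j ∈ PySem.Dict.getD pvMoveToFamilies s []) ↔ s ∈ pvFams.getD j [] := by
  have h := pvLookup_mem pvTableList s j (by decide)
  unfold PySem.Dict.getD pvMoveToFamilies
  rw [h]
  interval_cases j <;>
    simp [pvTableList, pvFams, pvPriorityMoves, pvRecoveryMoves, pvHazardMoves,
      pvHazardRemovalMoves, pvSupportMoves, pvSetupMoves, pvPivotMoves, pvScreenMoves,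
      pvPhazingMoves, pvTrickMoves, PySem.Set.mem_ofList, eq_comm] <;> tauto

lemma pvInter_nonempty (s t : List String) :
    ((!(PySem.Set.inter s t).isEmpty) = true) ↔ ∃ x ∈ s, x ∈ t := by
  simp only [PySem.Set.inter, PySem.Set.contains_eq_listContains, List.contains_eq_mem,
    Bool.not_eq_eq_eq_not, Bool.not_true, List.isEmpty_eq_false_iff, ne_eq,
    List.eq_nil_iff_forall_not_mem, List.mem_filter, decide_eq_true_eq, not_and, not_forall,
    Decidable.not_not]
  exact exists_congr fun x => exists_prop

lemma pvMemNorm (moves fam : List String) :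
    (∃ x ∈ PySem.Set.ofList ((moves.filter (fun m => m != "")).map pvNormalize), x ∈ fam) ↔
    ∃ m ∈ moves, m ≠ "" ∧ pvNormalize m ∈ fam := by
  simp only [PySem.Set.mem_ofList, List.mem_map, List.mem_filter, bne_iff_ne, ne_eq]
  constructor
  · rintro ⟨x, ⟨m, ⟨hm, hne⟩, rfl⟩, hx⟩; exact ⟨m, hm, hne, hx⟩
  · rintro ⟨m, hm, hne, hx⟩; exact ⟨pvNormalize m, ⟨m, ⟨hm, hne⟩, rfl⟩, hx⟩

lemma pvChain10 : ∀ (b0 b1 b2 b3 b4 b5 b6 b7 b8 b9 : Bool),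
    (let families := List.replicate 10 (0 : Int)
     let families := if b0 then families.set 0 1 else families
     let families := if b1 then families.set 1 1 else families
     let families := if b2 then families.set 2 1 else families
     let families := if b3 then families.set 3 1 else families
     let families := if b4 then families.set 4 1 else families
     let families := if b5 then families.set 5 1 else families
     let families := if b6 then families.set 6 1 else families
     let families := if b7 then families.set 7 1 else families
     let families := if b8 then families.set 8 1 else families
     let families := if b9 then families.set 9 1 else families
     families) =
    [if b0 then 1 else 0, if b1 then 1 else 0, if b2 then 1 else 0, if b3 then 1 else 0,
     if b4 then 1 else 0, if b5 then 1 else 0, if b6 then 1 else 0, if b7 then 1 else 0,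
     if b8 then 1 else 0, if b9 then 1 else 0] := by decide

lemma pvA_eq (moves : List String) (h : moves.isEmpty = false) :
    classify_move_families moves =
    [if pvC moves 0 then 1 else 0, if pvC moves 1 then 1 else 0, if pvC moves 2 then 1 else 0,
     if pvC moves 3 then 1 else 0, if pvC moves 4 then 1 else 0, if pvC moves 5 then 1 else 0,
     if pvC moves 6 then 1 else 0, if pvC moves 7 then 1 else 0, if pvC moves 8 then 1 else 0,
     if pvC moves 9 then 1 else 0] := by
  simp only [classify_move_families, h, Bool.false_eq_true, if_false]
  exact pvChain10 (pvC moves 0) (pvC moves 1) (pvC moves 2) (pvC moves 3) (pvC moves 4)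
    (pvC moves 5) (pvC moves 6) (pvC moves 7) (pvC moves 8) (pvC moves 9)

lemma pvFoldlSet_length (L : List Nat) (out : List Int) :
    (L.foldl (fun fs idx => fs.set idx 1) out).length = out.length := by
  induction L generalizing out with
  | nil => rfl
  | cons i L ih => simp [List.foldl_cons, ih]

lemma pvFoldlSet_getD (L : List Nat) (out : List Int) (j : Nat) (hj : j < out.length) :
    (L.foldl (fun fs idx => fs.set idx 1) out).getD j 0 =
    if L.contains j then 1 else out.getD j 0 := by
  induction L generalizing out with
  | nil => simp
  | cons i L ih =>
    rw [List.foldl_cons, ih _ (by simpa using hj)]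
    by_cases hij : j = i
    · subst hij
      simp [List.getD_eq_getElem?_getD, hj]
    · by_cases hL : j ∈ L <;>
        simp [List.getD_eq_getElem?_getD, hij, Ne.symm hij, hL]

lemma pvStep_length (out : List Int) (m : String) : (pvStep out m).length = out.length := by
  unfold pvStep; split_ifs <;> simp [pvFoldlSet_length]

lemma pvStep_getD (out : List Int) (m : String) (j : Nat) (hj : j < out.length) :
    (pvStep out m).getD j 0 = if pvHit m j then 1 else out.getD j 0 := by
  unfold pvStep pvHit
  by_cases hm : m == ""
  · have hm' : m = "" := by simpa using hm
    simp [hm']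
  · have hm' : ¬ m = "" := by simpa using hm
    rw [if_neg (by simpa using hm), pvFoldlSet_getD _ _ _ hj]
    by_cases hc : j ∈ PySem.Dict.getD pvMoveToFamilies (pvNormalize m) [] <;> simp [hm', hc]

lemma pvFoldlStep_length (ms : List String) (out : List Int) :
    (ms.foldl pvStep out).length = out.length := by
  induction ms generalizing out with
  | nil => rfl
  | cons m ms ih => rw [List.foldl_cons, ih, pvStep_length]

lemma pvFoldlStep_getD (ms : List String) (out : List Int) (j : Nat) (hj : j < out.length) :
    (ms.foldl pvStep out).getD j 0 = if pvAct ms j then 1 else out.getD j 0 := by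
  induction ms generalizing out with
  | nil => simp [pvAct]
  | cons m ms ih =>
    rw [List.foldl_cons, ih _ (by simpa [pvStep_length] using hj), pvStep_getD _ _ _ hj]
    simp only [pvAct, List.any_cons]
    by_cases h1 : pvHit m j <;> by_cases h2 : ms.any (fun m => pvHit m j) <;>
      simp [h1, h2]

lemma pvB_eq (moves : List String) :
    classify_move_families_alt moves =
    [if pvAct moves 0 then 1 else 0, if pvAct moves 1 then 1 else 0, if pvAct moves 2 then 1 else 0,
     if pvAct moves 3 then 1 else 0, if pvAct moves 4 then 1 else 0, if pvAct moves 5 then 1 else 0,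
     if pvAct moves 6 then 1 else 0, if pvAct moves 7 then 1 else 0, if pvAct moves 8 then 1 else 0,
     if pvAct moves 9 then 1 else 0] := by
  have hlen : (classify_move_families_alt moves).length = 10 := by
    simp [classify_move_families_alt, pvFoldlStep_length]
  apply List.ext_getElem (by simp [hlen])
  intro i h1 h2
  have h10 : i < 10 := by rw [hlen] at h1; exact h1
  rw [← List.getD_eq_getElem _ 0 h1]
  unfold classify_move_families_alt
  rw [pvFoldlStep_getD _ _ _ (by simpa using h10)]
  interval_cases i <;> simp

lemma pvC_eq_act (moves : List String) (j : Nat) (hj : j < 10) :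
    pvC moves j = pvAct moves j := by
  rw [Bool.eq_iff_iff]
  simp only [pvC]
  rw [pvInter_nonempty, pvMemNorm]
  simp only [pvAct, List.any_eq_true, pvHit, Bool.and_eq_true, bne_iff_ne, ne_eq,
    List.contains_eq_mem, decide_eq_true_eq]
  exact exists_congr fun m => and_congr_right fun _ => and_congr_right fun _ =>
    (pvTable_ok' (pvNormalize m) j hj).symm


-- ===== VERDICT (by name: the statement is the Claim_ definition above) =====
theorem classify_move_families_spec : Claim_equal_classify_move_families := by
  intro moves _
  unfold Spec_classify_move_families
  by_cases h : moves.isEmpty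
  · have : moves = [] := List.isEmpty_iff.mp h
    subst this; rfl
  · rw [pvA_eq moves (by simpa using h), pvB_eq moves]
    simp only [pvC_eq_act moves 0 (by omega), pvC_eq_act moves 1 (by omega),
      pvC_eq_act moves 2 (by omega), pvC_eq_act moves 3 (by omega),
      pvC_eq_act moves 4 (by omega), pvC_eq_act moves 5 (by omega),
      pvC_eq_act moves 6 (by omega), pvC_eq_act moves 7 (by omega),
      pvC_eq_act moves 8 (by omega), pvC_eq_act moves 9 (by omega)]
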